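-- pv_equiv track=rewrite | github.com/barbarafreitas22/Portefolio-AAB | Motifs/Procura_Exaustiva.py | procura_exaustiva
-- ===== SOURCE A (Python) =====
-- def score_motif(seqs, indices, L):
--     """
--     Calcula o score de uma configuração de motifs
--
--     Parâmetros:
--         seqs (list[str]): Lista de sequências de onde os motifs são extraídos
--         indices (list[int]): Lista com as posições de início dos motifs em cada sequência
--         L (int): Comprimento do motif
--
--     Return:
--         int: O score
--     """
--     # Extrai os motifs das sequências nas posições especificadas
--     motifs = [seq[i:i+L] for seq, i in zip(seqs, indices)]
--     total_score = 0  # Inicializa a pontuação total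
--     # Para cada coluna dos motifs, calcula a pontuação
--     for col in zip(*motifs):
--         # Adiciona o máximo da contagem de cada base na coluna à pontuação total
--         total_score += max(col.count(base) for base in set(col))
--     return total_score  # Retorna a pontuação total
--
-- def prox_combinacao(indices, seq_comp, L):
--     """
--     Gera a próxima combinação de índices para os motifs
--
--     Parâmetros:
--         indices (list[int]): Combinação atual de índices
--         seq_comp (list[int]): Lista com os comprimentos de cada sequência
--         L (int): Comprimento do motif
--
--     Return:
--         list[int] ou None: A próxima combinação de índices se existir; caso contrário, None se não houver mais combinações
--     """
--     novos_indices = indices.copy()  # Faz uma cópia da combinação atual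
--     pos = len(novos_indices) - 1  # Começa a verificar a partir do último índice
--     # Enquanto a posição atual estiver dentro do limite e não puder ser incrementada
--     while pos >= 0 and novos_indices[pos] >= seq_comp[pos] - L:
--         pos -= 1  # Move para a esquerda
--     if pos < 0:  # Se não houver mais combinações possíveis
--         return None  # Retorna None
--     novos_indices[pos] += 1  # Incrementa o índice na posição atual
--     # Reseta os índices à direita da posição atual para 0
--     for i in range(pos + 1, len(novos_indices)):
--         novos_indices[i] = 0
--     return novos_indices  # Retorna a nova combinação de índices
--
-- def procura_exaustiva(seqs, L):
--     """
--     Executa uma procura exaustiva nas sequências para encontrar a configuração de posições que maximiza o score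
--
--     Parâmetros:
--         seqs (list[str]): Lista de sequências de onde se pretende extrair os motifs
--         L (int): Comprimento do motif
--
--     Return:
--         Um tuplo com:
--             - list[int]: A configuração de índices que maximiza o score
--             - int: O score máximo obtido
--     """
--     seq_lengths = [len(seq) for seq in seqs]  # Obtém os comprimentos de cada sequência
--     indices = [0] * len(seqs)  # Inicializa os índices com 0
--     melhor_score = -1  # Inicializa a melhor pontuação como -1
--     melhores_indices = None  # Inicializa as melhores posições como None
--     # Enquanto houver combinações de índices
--     while indices is not None:
--         s = score_motif(seqs, indices, L)  # Calcula o score para a combinação atual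
--         if s > melhor_score:  # Se o score atual é melhor que o melhor score encontrado
--             melhor_score = s  # Atualiza o melhor score
--             melhores_indices = indices.copy()  # Atualiza as melhores posições
--         indices = prox_combinacao(indices, seq_lengths, L)  # Gera a próxima combinação
--     return melhores_indices, melhor_score  # Retorna as melhores posições e o score máximo
-- ===== SOURCE B (Python) =====
-- def score_motif(seqs, indices, L):
--     """Score of one configuration (same helper as the original module)."""
--     motifs = [seq[i:i+L] for seq, i in zip(seqs, indices)]
--     total_score = 0
--     for col in zip(*motifs):
--         total_score += max(col.count(base) for base in set(col))
--     return total_score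
--
-- def procura_exaustiva(seqs, L):
--     """Exhaustive motif search: enumerate every configuration by mixed-radix
--     decoding of a single counter k in range(total), instead of an odometer
--     successor function."""
--     # number of admissible start positions per sequence (at least 1: position 0)
--     sizes = [max(len(s) - L + 1, 1) for s in seqs]
--     # sufprod[i] = product of sizes[i+1:]; total = product of all sizes
--     sufprod = []
--     p = 1
--     for n in reversed(sizes):
--         sufprod.append(p)
--         p *= n
--     sufprod.reverse()
--     total = p
--     melhor_score = -1
--     melhores_indices = None
--     for k in range(total):
--         indices = []
--         r = k
--         for q in sufprod:
--             indices.append(r // q)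
--             r %= q
--         s = score_motif(seqs, indices, L)
--         if s > melhor_score:
--             melhor_score = s
--             melhores_indices = indices
--     return melhores_indices, melhor_score
-- ===== Notes on version B (the rewrite author's own statement) =====
-- stated objective: alternative
-- what changed: Replaces the odometer-style prox_combinacao successor function (a right-to-left scan-increment-reset over the index list each step) by a single flat loop over one counter k in range(total) that is mixed-radix decoded into the index configuration via precomputed suffix products; score_motif is kept as in the module.
import Mathlib
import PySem

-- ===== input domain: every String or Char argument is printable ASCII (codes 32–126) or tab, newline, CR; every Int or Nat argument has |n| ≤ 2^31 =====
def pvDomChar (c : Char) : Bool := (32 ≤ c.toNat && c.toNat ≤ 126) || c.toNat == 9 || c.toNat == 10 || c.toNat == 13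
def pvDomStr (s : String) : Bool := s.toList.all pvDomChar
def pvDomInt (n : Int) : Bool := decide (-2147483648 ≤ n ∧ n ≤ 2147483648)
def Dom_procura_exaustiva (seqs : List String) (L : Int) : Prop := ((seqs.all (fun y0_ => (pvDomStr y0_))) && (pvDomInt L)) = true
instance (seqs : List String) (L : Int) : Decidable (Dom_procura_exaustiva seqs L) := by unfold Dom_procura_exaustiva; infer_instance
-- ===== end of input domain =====

-- B replaces A's odometer successor function by one flat counter loop with mixed-radix
-- decoding via suffix products (objective: alternative algorithm, same cost).

-- ===== PORT A =====

-- termination lemma for pvCols (cited by its decreasing_by)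
lemma pvCols_dec : ∀ (ms : List (List Char)), ms ≠ [] → ms.all (fun l => !l.isEmpty) = true →
    ((ms.map List.tail).map List.length).sum < (ms.map List.length).sum
  | [], h, _ => absurd rfl h
  | a :: t, _, h2 => by
    simp only [List.all_cons, Bool.and_eq_true, Bool.not_eq_true'] at h2
    have ha : a ≠ [] := by
      cases a with | nil => simp at h2 | cons x xs => simp
    have hlt : a.tail.length < a.length := by
      cases a with | nil => exact absurd rfl ha | cons x xs => simp
    cases t with
    | nil => simpa using hlt
    | cons b u =>
      have := pvCols_dec (b :: u) (by simp) h2.2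
      simp only [List.map_cons, List.sum_cons] at *
      omega

-- zip(*motifs): truncating transpose (no PySem primitive; exact — stops at the shortest row,
-- and zip() of no iterables is empty)
def pvCols (ms : List (List Char)) : List (List Char) :=
  if h : ms ≠ [] ∧ ms.all (fun l => !l.isEmpty) then
    (ms.map (fun l => l.headD ' ')) :: pvCols (ms.map List.tail)
  else []
termination_by (ms.map List.length).sum
decreasing_by simpa using pvCols_dec ms h.1 h.2

-- score_motif: this helper is verbatim identical in A's module and in Source B; ported once,
-- used by both ports.  max(col.count(base) for base in set(col)): col is never empty, so
-- Python's max always exists (the .getD 0 default is unreachable); the max of Ints does not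
-- depend on the set's iteration order.
def pv_score_motif (seqs : List String) (indices : List Int) (L : Int) : Int :=
  let motifs := (List.zip seqs indices).map
    (fun p => PySem.List.slice p.1.toList (some p.2) (some (p.2 + L)))
  (pvCols motifs).foldl
    (fun acc col =>
      acc + ((PySem.List.max?
               ((PySem.Set.ofList col).map (fun b => (PySem.List.count col b : Int)))
               (fun x => x)).getD 0)) 0

-- prox_combinacao's while loop: 'while pos >= 0 and novos[pos] >= seq_comp[pos] - L: pos -= 1'
-- (indexing is always in range when 0 ≤ pos, so pyGetD's default is unreachable)
def pvProxScan (indices seq_comp : List Int) (L : Int) (pos : Int) : Int :=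
  if h : 0 ≤ pos ∧ PySem.List.pyGetD seq_comp pos 0 - L ≤ PySem.List.pyGetD indices pos 0 then
    pvProxScan indices seq_comp L (pos - 1)
  else pos
termination_by (pos + 1).toNat
decreasing_by omega

-- prox_combinacao: find pos, increment it, zero out everything to its right
def pv_prox (indices seq_comp : List Int) (L : Int) : Option (List Int) :=
  let pos := pvProxScan indices seq_comp L ((indices.length : Int) - 1)
  if pos < 0 then none
  else
    let novos := PySem.List.pySetD indices pos (PySem.List.pyGetD indices pos 0 + 1)
    some ((PySem.List.pyRange (pos + 1) (indices.length : Int) 1).foldl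
      (fun l i => PySem.List.pySetD l i 0) novos)

-- the while loop of procura_exaustiva; fuel is an upper bound on the number of iterations
-- (proved sufficient below), the fuel-exhausted branch is unreachable
def pvLoopA (seqs : List String) (seq_lengths : List Int) (L : Int) :
    Nat → Option (List Int) → Int → Option (List Int) → List Int × Int
  | _, none, melhor, melhores => (melhores.getD [], melhor)
  | 0, some _, melhor, melhores => (melhores.getD [], melhor)
  | Nat.succ fuel, some indices, melhor, melhores =>
    let s := pv_score_motif seqs indices L
    if s > melhor then
      pvLoopA seqs seq_lengths L fuel (pv_prox indices seq_lengths L) s (some indices)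
    else
      pvLoopA seqs seq_lengths L fuel (pv_prox indices seq_lengths L) melhor melhores

def procura_exaustiva (seqs : List String) (L : Int) : List Int × Int :=
  let seq_lengths := seqs.map (fun s => (PySem.Str.len s : Int))
  pvLoopA seqs seq_lengths L
    ((seqs.map (fun s => max ((PySem.Str.len s : Int) - L + 1) 1)).prod).toNat
    (some (List.replicate seqs.length 0)) (-1) none

-- ===== PORT B =====
-- (pv_score_motif above is Source B's verbatim copy of score_motif as well)
def procura_exaustiva_alt (seqs : List String) (L : Int) : List Int × Int :=
  let sizes := seqs.map (fun s => max ((PySem.Str.len s : Int) - L + 1) 1)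
  -- sufprod built back to front, then reversed; total = product of all sizes
  let sp := sizes.reverse.foldl (fun (acc : List Int × Int) n => (acc.1 ++ [acc.2], acc.2 * n)) ([], 1)
  let sufprod := sp.1.reverse
  let total := sp.2
  let res := (PySem.List.pyRange 0 total 1).foldl
    (fun (st : Int × Option (List Int)) k =>
      let dec := sufprod.foldl
        (fun (ir : List Int × Int) q => (ir.1 ++ [PySem.Int.floordiv ir.2 q], PySem.Int.mod ir.2 q))
        (([] : List Int), k)
      let indices := dec.1
      let s := pv_score_motif seqs indices L
      if s > st.1 then (s, some indices) else st)
    (-1, none)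
  (res.2.getD [], res.1)

-- ===== PRECONDITION & SPEC =====
def Spec_procura_exaustiva (seqs : List String) (L : Int) (out : List Int × Int) : Prop := out = procura_exaustiva_alt seqs L
instance (seqs : List String) (L : Int) (out : List Int × Int) : Decidable (Spec_procura_exaustiva seqs L out) := by unfold Spec_procura_exaustiva; infer_instance

-- ===== CLAIM (what is proved, stated in full; the proofs are below) =====
def Claim_equal_procura_exaustiva : Prop := ∀ (seqs : List String) (L : Int), Dom_procura_exaustiva seqs L → Spec_procura_exaustiva seqs L (procura_exaustiva seqs L)

-- ===== LEMMAS AND PROOFS =====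

-- number of admissible start positions in a sequence of length l
def pvSize (L l : Int) : Int := max (l - L + 1) 1
-- total number of configurations for the (length-)list ls
def pvP (L : Int) (ls : List Int) : Int := (ls.map (pvSize L)).prod
-- mixed-radix decoding of counter k into an index configuration
def pvDec (L : Int) : List Int → Int → List Int
  | [], _ => []
  | _ :: ls, k => PySem.Int.floordiv k (pvP L ls) :: pvDec L ls (PySem.Int.mod k (pvP L ls))
-- suffix products
def pvSuf (L : Int) : List Int → List Int
  | [] => []
  | _ :: ls => pvP L ls :: pvSuf L ls

lemma pvP_pos (L : Int) (ls : List Int) : 0 < pvP L ls := by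
  induction ls with
  | nil => simp [pvP]
  | cons l t ih =>
    have h1 : (1:Int) ≤ pvSize L l := le_max_right _ _
    simp only [pvP, List.map_cons, List.prod_cons] at *
    nlinarith

lemma pvDec_len (L : Int) (ls : List Int) (k : Int) : (pvDec L ls k).length = ls.length := by
  induction ls generalizing k with
  | nil => simp [pvDec]
  | cons l t ih => simp [pvDec, ih]

lemma pvDec_zero (L : Int) (ls : List Int) : pvDec L ls 0 = List.replicate ls.length 0 := by
  induction ls with
  | nil => simp [pvDec]
  | cons l t ih =>
    have hP := pvP_pos L t
    simp [pvDec, PySem.Int.floordiv_eq_ediv_of_pos hP, PySem.Int.mod_eq_emod_of_pos hP, ih,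
      List.replicate_succ]

-- B's sufprod computation
lemma pvSuf_fold (L : Int) (ls : List Int) :
    ((ls.map (pvSize L)).reverse).foldl (fun (acc : List Int × Int) n => (acc.1 ++ [acc.2], acc.2 * n)) ([], 1)
      = ((pvSuf L ls).reverse, pvP L ls) := by
  induction ls with
  | nil => simp [pvSuf, pvP]
  | cons l t ih =>
    simp only [List.map_cons, List.reverse_cons, List.foldl_append, ih, List.foldl_cons,
      List.foldl_nil, pvSuf, pvP, List.prod_cons]
    rw [Int.mul_comm]

-- B's inner decoding fold computes pvDec
lemma pvDec_fold (L : Int) : ∀ (ls : List Int) (acc : List Int) (k : Int),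
    ((pvSuf L ls).foldl
      (fun (ir : List Int × Int) q => (ir.1 ++ [PySem.Int.floordiv ir.2 q], PySem.Int.mod ir.2 q))
      (acc, k)).1 = acc ++ pvDec L ls k := by
  intro ls
  induction ls with
  | nil => intro acc k; simp [pvSuf, pvDec]
  | cons l t ih =>
    intro acc k
    simp only [pvSuf, List.foldl_cons, pvDec, ih, List.append_assoc, List.cons_append,
      List.nil_append]

lemma pvProxScan_step (indices seq_comp : List Int) (L pos : Int) :
    pvProxScan indices seq_comp L pos
      = if 0 ≤ pos ∧ PySem.List.pyGetD seq_comp pos 0 - L ≤ PySem.List.pyGetD indices pos 0 then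
          pvProxScan indices seq_comp L (pos - 1)
        else pos := by
  rw [pvProxScan]; simp only [dite_eq_ite]

lemma pvProxScan_neg (indices seq_comp : List Int) (L pos : Int) (h : pos < 0) :
    pvProxScan indices seq_comp L pos = pos := by
  rw [pvProxScan_step]; split_ifs with hc
  · omega
  · rfl

lemma pvGetD_cons_succ (x : Int) (xs : List Int) (j : Nat) :
    PySem.List.pyGetD (x :: xs) ((j : Int) + 1) 0 = PySem.List.pyGetD xs (j : Int) 0 := by
  have h : ((j : Int) + 1) = ((j + 1 : Nat) : Int) := by push_cast; ring
  rw [h, PySem.List.pyGetD_natCast, PySem.List.pyGetD_natCast, List.getD_cons_succ]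

lemma pvProxScan_le (indices seq_comp : List Int) (L : Int) (pos : Int) :
    pvProxScan indices seq_comp L pos ≤ pos := by
  induction h : (pos + 1).toNat generalizing pos with
  | zero => rw [pvProxScan_neg]; omega
  | succ n ih =>
    rw [pvProxScan_step]
    split_ifs with hc
    · have := ih (pos - 1) (by omega); omega
    · omega

lemma pvProxScan_cons (d l L : Int) (ds ls : List Int) : ∀ (j : Nat),
    pvProxScan (d :: ds) (l :: ls) L ((j : Int) + 1)
      = (let r := pvProxScan ds ls L (j : Int);
         if 0 ≤ r then r + 1 else if l - L ≤ d then -1 else 0) := by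
  intro j
  induction j with
  | zero =>
    simp only [Nat.cast_zero, zero_add]
    have h1 : PySem.List.pyGetD (d :: ds) (1 : Int) 0 = PySem.List.pyGetD ds (0 : Int) 0 := by
      simpa using pvGetD_cons_succ d ds 0
    have h2 : PySem.List.pyGetD (l :: ls) (1 : Int) 0 = PySem.List.pyGetD ls (0 : Int) 0 := by
      simpa using pvGetD_cons_succ l ls 0
    have hr : pvProxScan ds ls L 0
        = if PySem.List.pyGetD ls 0 0 - L ≤ PySem.List.pyGetD ds 0 0 then (-1 : Int) else 0 := by
      rw [pvProxScan_step ds ls L 0]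
      by_cases hin : PySem.List.pyGetD ls (0 : Int) 0 - L ≤ PySem.List.pyGetD ds (0 : Int) 0
      · have hc : (0:Int) ≤ 0 ∧ PySem.List.pyGetD ls (0:Int) 0 - L ≤ PySem.List.pyGetD ds (0:Int) 0 :=
          ⟨le_refl _, hin⟩
        rw [if_pos hc, if_pos hin]
        have : (0 : Int) - 1 = -1 := by norm_num
        rw [this, pvProxScan_neg ds ls L (-1) (by norm_num)]
      · rw [if_neg (fun hc => hin hc.2), if_neg hin]
    rw [pvProxScan_step (d :: ds), h1, h2, hr]
    by_cases hin : PySem.List.pyGetD ls (0 : Int) 0 - L ≤ PySem.List.pyGetD ds (0 : Int) 0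
    · have hc : (0:Int) ≤ 1 ∧ PySem.List.pyGetD ls (0:Int) 0 - L ≤ PySem.List.pyGetD ds (0:Int) 0 :=
        ⟨by norm_num, hin⟩
      rw [if_pos hc, if_pos hin, if_neg (by norm_num : ¬ (0:Int) ≤ -1)]
      have e1 : (1 : Int) - 1 = 0 := by norm_num
      rw [e1, pvProxScan_step (d :: ds) (l :: ls) L 0]
      simp only [PySem.List.pyGetD_zero_cons]
      by_cases hdl : l - L ≤ d
      · have hc2 : (0:Int) ≤ 0 ∧ l - L ≤ d := ⟨le_refl _, hdl⟩
        rw [if_pos hc2, if_pos hdl]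
        have e2 : (0 : Int) - 1 = -1 := by norm_num
        rw [e2, pvProxScan_neg (d :: ds) (l :: ls) L (-1) (by norm_num)]
      · rw [if_neg (fun hc => hdl hc.2), if_neg hdl]
    · rw [if_neg (fun hc => hin hc.2), if_neg hin, if_pos (le_refl (0:Int))]
      norm_num
  | succ j ih =>
    have h1 := pvGetD_cons_succ d ds (j + 1)
    have h2 := pvGetD_cons_succ l ls (j + 1)
    push_cast at h1 h2 ⊢
    rw [pvProxScan_step (d :: ds), h1, h2]
    by_cases hin : PySem.List.pyGetD ls ((j:Int)+1) 0 - L ≤ PySem.List.pyGetD ds ((j:Int)+1) 0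
    · have hc1 : (0:Int) ≤ (j:Int) + 1 + 1 ∧
          PySem.List.pyGetD ls ((j:Int)+1) 0 - L ≤ PySem.List.pyGetD ds ((j:Int)+1) 0 :=
        ⟨by positivity, hin⟩
      have hc2 : (0:Int) ≤ (j:Int) + 1 ∧
          PySem.List.pyGetD ls ((j:Int)+1) 0 - L ≤ PySem.List.pyGetD ds ((j:Int)+1) 0 :=
        ⟨by positivity, hin⟩
      rw [if_pos hc1, pvProxScan_step ds ls L ((j : Int) + 1), if_pos hc2]
      have e1 : (j:Int) + 1 + 1 - 1 = (j:Int) + 1 := by ring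
      have e2 : (j:Int) + 1 - 1 = (j:Int) := by ring
      rw [e1, e2, ih]
    · have hr2 : pvProxScan ds ls L ((j:Int)+1) = (j:Int)+1 := by
        rw [pvProxScan_step ds ls L ((j:Int)+1)]; exact if_neg (fun hc => hin hc.2)
      rw [if_neg (fun hc => hin hc.2), hr2,
        if_pos (by positivity : (0:Int) ≤ (j:Int) + 1)]

lemma pvZeroFold (xs : List Int) (a : Int) (h0 : 0 ≤ a) :
    (PySem.List.pyRange a (xs.length : Int) 1).foldl (fun l i => PySem.List.pySetD l i 0) xs
      = xs.take a.toNat ++ List.replicate (xs.length - a.toNat) 0 := by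
  induction h : xs.length - a.toNat generalizing xs a with
  | zero =>
    have ha : (xs.length : Int) ≤ a := by omega
    rw [PySem.List.pyRange_one_eq_nil ha, List.foldl_nil,
      List.take_of_length_le (by omega)]
    have h2 : xs.length - a.toNat = 0 := by omega
    simp [h2]
  | succ n ih =>
    have ha : a < (xs.length : Int) := by omega
    rw [PySem.List.pyRange_one_cons ha, List.foldl_cons]
    have hset : PySem.List.pySetD xs a 0 = xs.set a.toNat 0 := PySem.List.pySetD_of_nonneg _ _ h0
    rw [hset]
    have hlen : (xs.set a.toNat 0).length = xs.length := by simp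
    have := ih (xs.set a.toNat 0) (a + 1) (by omega) (by omega)
    rw [hlen] at this
    rw [this]
    have hp : a.toNat < xs.length := by omega
    have htake : (xs.set a.toNat 0).take (a + 1).toNat = xs.take a.toNat ++ [0] := by
      have h1 : (a + 1).toNat = a.toNat + 1 := by omega
      rw [h1, List.take_succ_eq_append_getElem (by simpa using hp)]
      congr 1
      · rw [List.take_set]
        exact List.set_eq_of_length_le (by simp)
      · simp [List.getElem_set]
    rw [htake]
    simp [List.replicate_succ]

-- closed form of pv_prox
lemma pv_prox_eq (indices comp : List Int) (L : Int) :
    pv_prox indices comp L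
      = (let pos := pvProxScan indices comp L ((indices.length : Int) - 1);
         if pos < 0 then none
         else some (indices.take pos.toNat
                    ++ (indices.getD pos.toNat 0 + 1)
                    :: List.replicate (indices.length - pos.toNat - 1) 0)) := by
  unfold pv_prox
  set pos := pvProxScan indices comp L ((indices.length : Int) - 1) with hpos
  by_cases hneg : pos < 0
  · simp [hneg]
  · have h0 : 0 ≤ pos := by omega
    have hle : pos ≤ (indices.length : Int) - 1 := pvProxScan_le _ _ _ _
    have hlt : pos.toNat < indices.length := by omega
    rw [if_neg hneg, if_neg hneg]
    have hget : PySem.List.pyGetD indices pos 0 = indices.getD pos.toNat 0 := by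
      rw [PySem.List.pyGetD_eq_getElem _ _ h0 (by omega), List.getD_eq_getElem _ _ hlt]
    have hset : PySem.List.pySetD indices pos (PySem.List.pyGetD indices pos 0 + 1)
        = indices.set pos.toNat (indices.getD pos.toNat 0 + 1) := by
      rw [hget, PySem.List.pySetD_of_nonneg _ _ h0]
    rw [hset]
    have hlen : (indices.set pos.toNat (indices.getD pos.toNat 0 + 1)).length = indices.length := by
      simp
    have hz := pvZeroFold (indices.set pos.toNat (indices.getD pos.toNat 0 + 1)) (pos + 1) (by omega)
    rw [hlen] at hz
    simp only [hz]
    have htake : (indices.set pos.toNat (indices.getD pos.toNat 0 + 1)).take (pos + 1).toNat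
        = indices.take pos.toNat ++ [indices.getD pos.toNat 0 + 1] := by
      have h1 : (pos + 1).toNat = pos.toNat + 1 := by omega
      rw [h1, List.take_succ_eq_append_getElem (by simpa using hlt)]
      congr 1
      · rw [List.take_set]
        exact List.set_eq_of_length_le (by simp)
      · simp [List.getElem_set]
    rw [htake]
    have harith : indices.length - (pos + 1).toNat = indices.length - pos.toNat - 1 := by omega
    rw [harith]
    simp

-- recursive characterisation of pv_prox
lemma pv_prox_rec (d l L : Int) (ds ls : List Int) :
    pv_prox (d :: ds) (l :: ls) L
      = (match pv_prox ds ls L with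
         | some ds' => some (d :: ds')
         | none => if l - L ≤ d then none else some ((d + 1) :: List.replicate ds.length 0)) := by
  cases ds with
  | nil =>
    have hinner : pv_prox [] ls L = none := by
      rw [pv_prox_eq]
      simp only [List.length_nil, Nat.cast_zero]
      rw [show (0:Int) - 1 = -1 by norm_num, pvProxScan_neg _ _ _ _ (by norm_num)]
      simp
    rw [hinner, pv_prox_eq]
    simp only [List.length_cons, List.length_nil]
    rw [show (0:Nat) + 1 = 1 by norm_num]
    rw [show ((1:Nat):Int) - 1 = 0 by norm_num]
    by_cases hdl : l - L ≤ d
    · have hs : pvProxScan [d] (l :: ls) L 0 = -1 := by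
        rw [pvProxScan_step [d] (l :: ls) L 0]
        simp only [PySem.List.pyGetD_zero_cons]
        have hc : (0:Int) ≤ 0 ∧ l - L ≤ d := ⟨le_refl _, hdl⟩
        rw [if_pos hc, show (0:Int) - 1 = -1 by norm_num]
        exact pvProxScan_neg _ _ _ _ (by norm_num)
      rw [hs]
      simp [hdl]
    · have hs : pvProxScan [d] (l :: ls) L 0 = 0 := by
        rw [pvProxScan_step [d] (l :: ls) L 0]
        simp only [PySem.List.pyGetD_zero_cons]
        rw [if_neg (fun hc => hdl hc.2)]
      rw [hs]
      simp [hdl]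
  | cons e es =>
    rw [pv_prox_eq (d :: e :: es), pv_prox_eq (e :: es)]
    have e1 : (((d :: e :: es).length : Nat) : Int) - 1 = ((es.length : Nat) : Int) + 1 := by
      push_cast [List.length_cons]; ring
    have e2 : (((e :: es).length : Nat) : Int) - 1 = ((es.length : Nat) : Int) := by
      simp
    rw [e1, e2, pvProxScan_cons d l L (e :: es) ls es.length]
    set r := pvProxScan (e :: es) ls L ((es.length : Nat) : Int) with hr
    by_cases h0 : 0 ≤ r
    · have hle : r ≤ ((es.length : Nat) : Int) := by
        rw [hr]; exact pvProxScan_le _ _ _ _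
      rw [if_pos h0, if_neg (by omega : ¬ r + 1 < 0), if_neg (by omega : ¬ r < 0)]
      simp only [Option.some.injEq]
      have hn : (r + 1).toNat = r.toNat + 1 := by omega
      rw [hn]
      simp only [List.take_succ_cons, List.getD_cons_succ, List.length_cons]
      have harith : es.length + 1 + 1 - (r.toNat + 1) - 1 = es.length + 1 - r.toNat - 1 := by omega
      rw [harith]
      simp
    · rw [if_neg h0, if_pos (by omega : r < 0)]
      by_cases hdl : l - L ≤ d
      · rw [if_pos hdl, if_pos (by norm_num : (-1:Int) < 0)]
        simp [hdl]
      · rw [if_neg hdl, if_neg (by norm_num : ¬ (0:Int) < 0)]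
        simp [hdl]

-- pv_prox is the mixed-radix successor
lemma pv_prox_succ (L : Int) : ∀ (ls : List Int) (k : Int), 0 ≤ k → k + 1 ≤ pvP L ls →
    pv_prox (pvDec L ls k) ls L
      = (if k + 1 < pvP L ls then some (pvDec L ls (k + 1)) else none) := by
  intro ls
  induction ls with
  | nil =>
    intro k h0 hk
    have hk1 : k = 0 := by simp [pvP] at hk; omega
    have hnone : pv_prox (pvDec L [] k) [] L = none := by
      rw [pv_prox_eq]
      simp only [pvDec, List.length_nil, Nat.cast_zero]
      rw [show (0:Int) - 1 = -1 by norm_num, pvProxScan_neg _ _ _ _ (by norm_num)]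
      simp
    rw [hnone, if_neg]
    simp [pvP, hk1]
  | cons l t ih =>
    intro k h0 hk
    have hP : 0 < pvP L t := pvP_pos L t
    have hS : (1:Int) ≤ pvSize L l := le_max_right _ _
    have hPc : pvP L (l :: t) = pvSize L l * pvP L t := by simp [pvP]
    have hfd : PySem.Int.floordiv k (pvP L t) = k / pvP L t := PySem.Int.floordiv_eq_ediv_of_pos hP
    have hmd : PySem.Int.mod k (pvP L t) = k % pvP L t := PySem.Int.mod_eq_emod_of_pos hP
    have h0r : 0 ≤ k % pvP L t := Int.emod_nonneg k (ne_of_gt hP)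
    have hrP : k % pvP L t < pvP L t := Int.emod_lt_of_pos k hP
    have h0d : 0 ≤ k / pvP L t := Int.ediv_nonneg h0 (le_of_lt hP)
    have hdS : k / pvP L t < pvSize L l := by
      refine (Int.ediv_lt_iff_lt_mul hP).mpr ?_
      rw [hPc] at hk; linarith
    have hkeq : pvP L t * (k / pvP L t) + k % pvP L t = k := Int.ediv_add_emod k (pvP L t)
    have hdec : pvDec L (l :: t) k = (k / pvP L t) :: pvDec L t (k % pvP L t) := by
      simp only [pvDec, hfd, hmd]
    have hmax : pvSize L l = max (l - L + 1) 1 := rfl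
    rw [hdec, pv_prox_rec]
    by_cases hr1 : k % pvP L t + 1 < pvP L t
    · rw [ih (k % pvP L t) h0r (by omega), if_pos hr1]
      have hmono : pvP L t * (k / pvP L t + 1) ≤ pvP L t * pvSize L l :=
        mul_le_mul_of_nonneg_left (by omega) (le_of_lt hP)
      have e : pvP L t * (k / pvP L t + 1) = pvP L t * (k / pvP L t) + pvP L t := by ring
      have e2 : pvP L t * pvSize L l = pvSize L l * pvP L t := by ring
      have hlt : k + 1 < pvP L (l :: t) := by rw [hPc]; linarith
      rw [if_pos hlt]
      have hfd2 : (k + 1) / pvP L t = k / pvP L t := by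
        rw [show k + 1 = (k % pvP L t + 1) + pvP L t * (k / pvP L t) by omega,
          Int.add_mul_ediv_left _ _ (ne_of_gt hP), Int.ediv_eq_zero_of_lt (by omega) hr1]
        ring
      have hmd2 : (k + 1) % pvP L t = k % pvP L t + 1 := by
        rw [show k + 1 = (k % pvP L t + 1) + pvP L t * (k / pvP L t) by omega]
        rw [Int.add_mul_emod_self_left, Int.emod_eq_of_lt (by omega) hr1]
      have hdec2 : pvDec L (l :: t) (k + 1) = (k / pvP L t) :: pvDec L t (k % pvP L t + 1) := by
        simp only [pvDec, PySem.Int.floordiv_eq_ediv_of_pos hP, PySem.Int.mod_eq_emod_of_pos hP,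
          hfd2, hmd2]
      rw [hdec2]
    · have hreq : k % pvP L t + 1 = pvP L t := by omega
      rw [ih (k % pvP L t) h0r (by omega), if_neg hr1]
      by_cases hds : k / pvP L t = pvSize L l - 1
      · have hcond : l - L ≤ k / pvP L t := by omega
        have hm : pvP L t * (k / pvP L t) = pvP L t * pvSize L l - pvP L t := by rw [hds]; ring
        have e2 : pvP L t * pvSize L l = pvSize L l * pvP L t := by ring
        rw [if_pos hcond, if_neg (by rw [hPc]; intro hcc; linarith)]
      · have hcond : ¬ (l - L ≤ k / pvP L t) := by omega
        have e : pvP L t * (k / pvP L t + 1) = pvP L t * (k / pvP L t) + pvP L t := by ring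
        have hk1 : k + 1 = pvP L t * (k / pvP L t + 1) := by linarith
        have hmono : pvP L t * (k / pvP L t + 1) ≤ pvP L t * (pvSize L l - 1) :=
          mul_le_mul_of_nonneg_left (by omega) (le_of_lt hP)
        have e3 : pvP L t * (pvSize L l - 1) = pvSize L l * pvP L t - pvP L t := by ring
        rw [if_neg hcond, if_pos (by rw [hPc]; linarith)]
        have hfd2 : (k + 1) / pvP L t = k / pvP L t + 1 := by
          rw [hk1, Int.mul_ediv_cancel_left _ (ne_of_gt hP)]
        have hmd2 : (k + 1) % pvP L t = 0 := by
          rw [hk1, Int.mul_emod_right]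
        have hdec2 : pvDec L (l :: t) (k + 1)
            = (k / pvP L t + 1) :: List.replicate t.length 0 := by
          simp only [pvDec, PySem.Int.floordiv_eq_ediv_of_pos hP, PySem.Int.mod_eq_emod_of_pos hP,
            hfd2, hmd2, pvDec_zero]
        rw [hdec2, pvDec_len]

-- A's loop = one fold over the counters
lemma pvLoop_eq (seqs : List String) (L : Int) (ls : List Int) :
    ∀ (n : Nat) (k : Int), 0 ≤ k → k + n = pvP L ls → 1 ≤ n → ∀ (b : Int) (bi : Option (List Int)),
    pvLoopA seqs ls L n (some (pvDec L ls k)) b bi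
      = (let res := (PySem.List.pyRange k (pvP L ls) 1).foldl
           (fun (st : Int × Option (List Int)) k' =>
             let s := pv_score_motif seqs (pvDec L ls k') L
             if s > st.1 then (s, some (pvDec L ls k')) else st) (b, bi);
         (res.2.getD [], res.1)) := by
  intro n
  induction n with
  | zero => intro k h0 htot h1 b bi; exact absurd h1 (by omega)
  | succ n ihn =>
    intro k h0 htot h1 b bi
    have hk1 : k + 1 ≤ pvP L ls := by push_cast at htot; omega
    simp only [pvLoopA]
    rw [pv_prox_succ L ls k h0 hk1]
    cases n with
    | zero =>
      have hEq : pvP L ls = k + 1 := by push_cast at htot; omega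
      rw [if_neg (show ¬ (k + 1 < pvP L ls) by omega), hEq, PySem.List.pyRange_one_singleton]
      simp only [List.foldl_cons, List.foldl_nil]
      by_cases hs : pv_score_motif seqs (pvDec L ls k) L > b
      · rw [if_pos hs, if_pos hs]
        simp [pvLoopA]
      · rw [if_neg hs, if_neg hs]
        simp [pvLoopA]
    | succ m =>
      have hlt : k + 1 < pvP L ls := by push_cast at htot; omega
      rw [if_pos hlt, PySem.List.pyRange_one_cons (by omega : k < pvP L ls)]
      simp only [List.foldl_cons]
      by_cases hs : pv_score_motif seqs (pvDec L ls k) L > b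
      · rw [if_pos hs, if_pos hs]
        exact ihn (k + 1) (by omega) (by push_cast at htot ⊢; omega) (by omega) _ _
      · rw [if_neg hs, if_neg hs]
        exact ihn (k + 1) (by omega) (by push_cast at htot ⊢; omega) (by omega) _ _

-- ===== VERDICT (by name: the statement is the Claim_ definition above) =====
theorem procura_exaustiva_spec : Claim_equal_procura_exaustiva := by
  intro seqs L _
  unfold Spec_procura_exaustiva
  unfold procura_exaustiva procura_exaustiva_alt
  simp only []
  set lens := seqs.map (fun s => (PySem.Str.len s : Int)) with hlens
  have hsz : seqs.map (fun s => max ((PySem.Str.len s : Int) - L + 1) 1) = lens.map (pvSize L) := by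
    rw [hlens, List.map_map]; rfl
  rw [hsz, pvSuf_fold L lens]
  simp only [List.reverse_reverse]
  have hstep : (fun (st : Int × Option (List Int)) k =>
      let dec := (pvSuf L lens).foldl
        (fun (ir : List Int × Int) q => (ir.1 ++ [PySem.Int.floordiv ir.2 q], PySem.Int.mod ir.2 q))
        (([] : List Int), k)
      let indices := dec.1
      let s := pv_score_motif seqs indices L
      if s > st.1 then (s, some indices) else st)
    = (fun (st : Int × Option (List Int)) k' =>
        let s := pv_score_motif seqs (pvDec L lens k') L
        if s > st.1 then (s, some (pvDec L lens k')) else st) := by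
    funext st k
    simp only [pvDec_fold L lens [] k, List.nil_append]
  rw [hstep]
  have hP := pvP_pos L lens
  have hprod : (lens.map (pvSize L)).prod = pvP L lens := rfl
  rw [hprod]
  have hrep : List.replicate seqs.length (0:Int) = pvDec L lens 0 := by
    rw [pvDec_zero]
    simp [hlens]
  rw [hrep]
  exact pvLoop_eq seqs L lens (pvP L lens).toNat 0 (le_refl 0) (by omega) (by omega) (-1) none
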